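-- pv_equiv track=rewrite | github.com/Alex-Shen1121/SZU_Learning_Resource | 计算机与软件学院/Python程序设计/实验/实验8/code/代码/作业/problem4.py | offBySwap
-- ===== SOURCE A (Python) =====
-- def offBySwap(str1, str2):
--     l1, l2 = len(str1), len(str2)
--     if l1 != l2 or str1 == str2:
--         return False
--     for i in range(l1-1):
--         str3 = str2[:i]+str2[i+1]+str2[i]+str2[i+2:]
--         if str1 == str3:
--             return True
--     return False
-- ===== SOURCE B (Python) =====
-- def offBySwap(str1, str2):
--     n = len(str1)
--     if n != len(str2):
--         return False
--     i = 0
--     while i < n and str1[i] == str2[i]: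
--         i += 1
--     if i >= n - 1:
--         return False
--     return (str1[i] == str2[i + 1] and str1[i + 1] == str2[i]
--             and str1[i + 2:] == str2[i + 2:])
-- ===== Notes on version B (the rewrite author's own statement) =====
-- stated objective: faster
-- what changed: A rebuilds a swapped copy of str2 for every position and compares whole strings (quadratic); B finds the first mismatch in one pass and checks that the two characters there are crossed and the remaining suffix is identical.
import Mathlib
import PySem

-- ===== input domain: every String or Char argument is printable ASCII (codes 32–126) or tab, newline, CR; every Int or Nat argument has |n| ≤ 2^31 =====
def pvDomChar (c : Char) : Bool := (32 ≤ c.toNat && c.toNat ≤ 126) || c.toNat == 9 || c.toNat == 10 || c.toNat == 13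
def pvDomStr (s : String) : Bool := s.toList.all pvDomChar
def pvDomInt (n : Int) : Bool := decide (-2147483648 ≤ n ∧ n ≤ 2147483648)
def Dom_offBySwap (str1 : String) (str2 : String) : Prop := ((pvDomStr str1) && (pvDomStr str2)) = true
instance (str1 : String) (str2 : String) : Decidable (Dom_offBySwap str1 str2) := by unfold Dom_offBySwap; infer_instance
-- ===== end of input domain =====

-- B replaces A's quadratic build-a-swapped-copy-per-position scan by a single pass that
-- strips the common prefix and checks the two characters at the first mismatch are crossed
-- and the suffixes coincide (objective: faster).


-- ===== PORT A =====
-- str3 = str2[:i] + str2[i+1] + str2[i] + str2[i+2:]  (indices always in range inside the loop)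
def pvStr3 (l2 : List Char) (i : Int) : List Char :=
  PySem.List.slice l2 none (some i)
    ++ [PySem.List.pyGetD l2 (i + 1) ' ']
    ++ [PySem.List.pyGetD l2 i ' ']
    ++ PySem.List.slice l2 (some (i + 2)) none

def offBySwap (str1 : String) (str2 : String) : Bool :=
  let l1 : Int := PySem.Str.len str1
  let l2 : Int := PySem.Str.len str2
  if l1 ≠ l2 ∨ str1 = str2 then false
  else (PySem.List.pyRange 0 (l1 - 1) 1).any (fun i => decide (str1.toList = pvStr3 str2.toList i))

-- ===== PORT B =====
-- the while loop of Source B: strip the common prefix of the two strings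
def pvStrip : List Char → List Char → List Char × List Char
  | a :: t1, b :: t2 => if a = b then pvStrip t1 t2 else (a :: t1, b :: t2)
  | l1, l2 => (l1, l2)

-- Source B's final return: at least two characters must remain past the first mismatch,
-- crossed there, with identical suffixes
def pvCheck : List Char × List Char → Bool
  | (a :: a' :: t1, b :: b' :: t2) => a = b' && a' = b && decide (t1 = t2)
  | _ => false

def offBySwap_alt (str1 : String) (str2 : String) : Bool :=
  if str1.toList.length ≠ str2.toList.length then false
  else pvCheck (pvStrip str1.toList str2.toList)

-- ===== PRECONDITION & SPEC =====
def Spec_offBySwap (str1 : String) (str2 : String) (out : Bool) : Prop := out = offBySwap_alt str1 str2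
instance (str1 : String) (str2 : String) (out : Bool) : Decidable (Spec_offBySwap str1 str2 out) := by unfold Spec_offBySwap; infer_instance

-- ===== CLAIM (what is proved, stated in full; the proofs are below) =====
def Claim_equal_offBySwap : Prop := ∀ (str1 : String) (str2 : String), Dom_offBySwap str1 str2 → Spec_offBySwap str1 str2 (offBySwap str1 str2)

-- ===== LEMMAS AND PROOFS =====

-- the Nat-indexed value of str3: str2 with positions k and k+1 swapped
def pvSwapNat (l2 : List Char) (k : Nat) : List Char :=
  l2.take k ++ [l2.getD (k + 1) ' ', l2.getD k ' '] ++ l2.drop (k + 2)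

theorem pvSwapNat_cons (c : Char) (l : List Char) (k : Nat) :
    pvSwapNat (c :: l) (k + 1) = c :: pvSwapNat l k := by
  simp [pvSwapNat, List.take_succ_cons, List.getD]

theorem pvStr3_eq (l2 : List Char) (k : Nat) :
    pvStr3 l2 (k : Int) = pvSwapNat l2 k := by
  unfold pvStr3 pvSwapNat
  rw [show ((k : Int) + 1) = ((k + 1 : Nat) : Int) by push_cast; ring,
      show ((k : Int) + 2) = ((k + 2 : Nat) : Int) by push_cast; ring]
  rw [PySem.List.slice_to_natCast, PySem.List.slice_from_natCast,
      PySem.List.pyGetD_natCast, PySem.List.pyGetD_natCast]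
  simp

-- characterisation of A's loop success over the range
theorem A_char (l1 l2 : List Char) :
    ((PySem.List.pyRange 0 ((l2.length : Int) - 1) 1).any
        (fun i => decide (l1 = pvStr3 l2 i)) = true)
      ↔ ∃ k : Nat, k + 2 ≤ l2.length ∧ l1 = pvSwapNat l2 k := by
  rw [List.any_eq_true]
  constructor
  · rintro ⟨i, hi, hdec⟩
    rw [PySem.List.mem_pyRange_one] at hi
    obtain ⟨h0, hlt⟩ := hi
    refine ⟨i.toNat, by omega, ?_⟩
    have hcast : (i.toNat : Int) = i := Int.toNat_of_nonneg h0
    rw [← pvStr3_eq, hcast]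
    exact of_decide_eq_true hdec
  · rintro ⟨k, hk, heq⟩
    refine ⟨(k : Int), ?_, by rw [pvStr3_eq]; exact decide_eq_true heq⟩
    rw [PySem.List.mem_pyRange_one]; omega

-- characterisation of B's post-strip check
theorem B_char (l1 l2 : List Char) (h : l1.length = l2.length) :
    pvCheck (pvStrip l1 l2) = true
      ↔ l1 ≠ l2 ∧ ∃ k : Nat, k + 2 ≤ l2.length ∧ l1 = pvSwapNat l2 k := by
  induction l1 generalizing l2 with
  | nil =>
    have : l2 = [] := by cases l2 <;> simp_all
    subst this
    simp [pvStrip, pvCheck]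
  | cons a t1 ih =>
    cases l2 with
    | nil => simp at h
    | cons b t2 =>
      by_cases hab : a = b
      · subst hab
        rw [show pvStrip (a :: t1) (a :: t2) = pvStrip t1 t2 by simp [pvStrip]]
        rw [ih t2 (by simpa using h)]
        constructor
        · rintro ⟨hne, k, hk, heq⟩
          refine ⟨by simp [hne], k + 1, by simpa using hk, ?_⟩
          rw [pvSwapNat_cons, heq]
        · rintro ⟨hne, k, hk, heq⟩
          cases k with
          | zero =>
            -- swap at position 0 with equal heads would force t1 = t2, contradiction
            exfalso
            have ht2 : t2 ≠ [] := by intro h'; subst h'; simp at hk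
            obtain ⟨b', r2, rfl⟩ := List.exists_cons_of_ne_nil ht2
            simp [pvSwapNat, List.getD] at heq
            exact hne (by simp [heq.1, heq.2])
          | succ j =>
            rw [pvSwapNat_cons] at heq
            simp only [List.cons.injEq] at heq
            exact ⟨by simpa using hne, j, by simp at hk; omega, heq.2⟩
      · rw [show pvStrip (a :: t1) (b :: t2) = (a :: t1, b :: t2) by simp [pvStrip, hab]]
        constructor
        · intro hm
          cases t1 with
          | nil => simp [pvCheck] at hm
          | cons a' r1 =>
            cases t2 with
            | nil => simp [pvCheck] at hm
            | cons b' r2 =>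
              simp only [pvCheck, Bool.and_eq_true, decide_eq_true_eq] at hm
              obtain ⟨⟨h1, h2⟩, h3⟩ := hm
              refine ⟨by simp [hab], 0, by simp, ?_⟩
              simp [pvSwapNat, List.getD, h1, h2, h3]
        · rintro ⟨hne, k, hk, heq⟩
          cases k with
          | zero =>
            have ht2 : t2 ≠ [] := by intro h'; subst h'; simp at hk
            obtain ⟨b', r2, rfl⟩ := List.exists_cons_of_ne_nil ht2
            simp [pvSwapNat, List.getD] at heq
            obtain ⟨hab', ht⟩ := heq
            cases t1 with
            | nil => simp at ht
            | cons a' r1 =>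
              simp only [List.cons.injEq] at ht
              simp [pvCheck, hab', ht.1, ht.2]
          | succ j =>
            rw [pvSwapNat_cons] at heq
            simp only [List.cons.injEq] at heq
            exact absurd heq.1 hab

-- ===== VERDICT (by name: the statement is the Claim_ definition above) =====
theorem offBySwap_spec : Claim_equal_offBySwap := by
  intro str1 str2 _
  unfold Spec_offBySwap offBySwap offBySwap_alt
  simp only [PySem.Str.len_eq]
  by_cases hlen : str1.toList.length = str2.toList.length
  · rw [if_neg (not_not_intro hlen)]
    by_cases heq : str1 = str2
    · rw [if_pos (Or.inr heq)]
      cases hb : pvCheck (pvStrip str1.toList str2.toList) with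
      | false => rfl
      | true => exact absurd (congrArg String.toList heq) ((B_char _ _ hlen).mp hb).1
    · have hneI : ¬ ((str1.toList.length : Int) ≠ (str2.toList.length : Int) ∨ str1 = str2) := by
        push Not
        exact ⟨by exact_mod_cast hlen, heq⟩
      rw [if_neg hneI]
      have hne : str1.toList ≠ str2.toList := fun h => heq (String.ext_iff.mpr h)
      rw [show (str1.toList.length : Int) - 1 = (str2.toList.length : Int) - 1 by rw [hlen]]
      cases hb : pvCheck (pvStrip str1.toList str2.toList) with
      | true =>
        obtain ⟨_, k, hk, hsw⟩ := (B_char _ _ hlen).mp hb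
        exact (A_char _ _).mpr ⟨k, hk, hsw⟩
      | false =>
        cases ha : (PySem.List.pyRange 0 ((str2.toList.length : Int) - 1) 1).any
            (fun i => decide (str1.toList = pvStr3 str2.toList i)) with
        | false => rfl
        | true =>
          obtain ⟨k, hk, hsw⟩ := (A_char _ _).mp ha
          have := (B_char _ _ hlen).mpr ⟨hne, k, hk, hsw⟩
          rw [hb] at this
          exact absurd this (by simp)
  · rw [if_pos (Or.inl (show (str1.toList.length : Int) ≠ str2.toList.length by
        exact_mod_cast hlen)),
      if_pos hlen]
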